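-- pv_equiv track=rewrite | github.com/andrewcgase/QCF_PICKS | process_anne_picks.py | split_segments
-- ===== SOURCE A (Python) =====
-- def split_segments(picks, gap_threshold):
--     """
--     Partition picks into contiguous segments.
--     A new segment begins whenever two consecutive FFIDs differ by more than
--     gap_threshold.  Each segment is returned as a list of [FFID, Time] pairs.
--     """
--     if not picks:
--         return []
--     segments, current = [], [picks[0]]
--     for i in range(1, len(picks)):
--         if picks[i][0] - picks[i - 1][0] > gap_threshold:
--             segments.append(current)
--             current = []
--         current.append(picks[i])
--     segments.append(current)
--     return segments
-- ===== SOURCE B (Python) =====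
-- def split_segments(picks, gap_threshold):
--     """
--     Partition picks into contiguous segments.
--     Two-pass re-implementation: collect break indices, then slice.
--     """
--     if not picks:
--         return []
--     breaks = [i for i in range(1, len(picks))
--               if picks[i][0] - picks[i - 1][0] > gap_threshold]
--     bounds = [0] + breaks + [len(picks)]
--     return [picks[a:b] for a, b in zip(bounds, bounds[1:])]
-- ===== Notes on version B (the rewrite author's own statement) =====
-- stated objective: alternative
-- what changed: Replaces the stateful append-per-element accumulator loop by a two-pass scheme: one pass collects the break indices where the FFID gap exceeds the threshold, then segments are produced by slicing between consecutive boundaries.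
import Mathlib
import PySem

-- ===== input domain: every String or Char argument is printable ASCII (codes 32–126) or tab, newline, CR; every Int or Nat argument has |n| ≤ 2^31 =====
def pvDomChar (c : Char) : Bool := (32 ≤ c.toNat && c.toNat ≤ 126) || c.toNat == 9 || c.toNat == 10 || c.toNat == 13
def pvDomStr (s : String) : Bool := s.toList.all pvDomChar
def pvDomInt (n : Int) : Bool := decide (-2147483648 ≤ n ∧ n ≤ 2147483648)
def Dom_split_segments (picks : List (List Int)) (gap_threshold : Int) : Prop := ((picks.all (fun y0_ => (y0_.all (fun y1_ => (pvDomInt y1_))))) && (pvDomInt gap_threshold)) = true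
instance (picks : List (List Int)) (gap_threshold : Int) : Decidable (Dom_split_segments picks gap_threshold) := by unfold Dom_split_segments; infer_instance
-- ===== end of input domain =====

-- B replaces A's stateful accumulator loop by a break-index collection pass followed by slicing
-- between consecutive boundaries (objective: alternative decomposition, same cost).

-- ===== PORT A =====
-- Loop `for i in range(1, len(picks))` ported as a foldl over the Nat indices 1..n-1
-- (List.range' 1 (n-1)); those indices are always in range, so `picks.getD i []` is exact,
-- and `row[0]` is ported as `.headD 0`, exact under Pre_ (rows nonempty; Python raises there).
def split_segments (picks : List (List Int)) (gap_threshold : Int) : List (List (List Int)) :=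
  match picks with
  | [] => []
  | p0 :: _ =>
    let st := (List.range' 1 (picks.length - 1)).foldl
      (fun (st : List (List (List Int)) × List (List Int)) i =>
        if (picks.getD i []).headD 0 - (picks.getD (i - 1) []).headD 0 > gap_threshold then
          (st.1 ++ [st.2], [picks.getD i []])
        else (st.1, st.2 ++ [picks.getD i []]))
      ([], [p0])
    st.1 ++ [st.2]

-- ===== PORT B =====
-- Python slice picks[a:b] with 0 ≤ a ≤ b ≤ len(picks) is exactly (picks.take b).drop a.
def split_segments_alt (picks : List (List Int)) (gap_threshold : Int) : List (List (List Int)) :=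
  if picks = [] then []
  else
    let breaks := (List.range' 1 (picks.length - 1)).filter
      (fun i => (picks.getD i []).headD 0 - (picks.getD (i - 1) []).headD 0 > gap_threshold)
    let bounds := 0 :: breaks ++ [picks.length]
    (bounds.zip bounds.tail).map (fun ab => (picks.take ab.2).drop ab.1)

-- ===== PRECONDITION & SPEC =====
-- Pre_ excludes exactly the inputs on which Python A raises IndexError at picks[i][0]:
-- a list of length ≥ 2 containing an empty row (with ≤ 1 row the loop body never indexes a row).
def Pre_split_segments (picks : List (List Int)) (gap_threshold : Int) : Prop :=
  picks.length ≤ 1 ∨ ∀ row ∈ picks, row ≠ []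
instance (picks : List (List Int)) (gap_threshold : Int) : Decidable (Pre_split_segments picks gap_threshold) := by unfold Pre_split_segments; infer_instance
def pvWitness_split_segments : List (List Int) × Int := ([[1, 10], [2, 20], [9, 30]], 3)

def Spec_split_segments (picks : List (List Int)) (gap_threshold : Int) (out : List (List (List Int))) : Prop := out = split_segments_alt picks gap_threshold
instance (picks : List (List Int)) (gap_threshold : Int) (out : List (List (List Int))) : Decidable (Spec_split_segments picks gap_threshold out) := by unfold Spec_split_segments; infer_instance

-- ===== CLAIM (what is proved, stated in full; the proofs are below) =====
def Claim_equal_split_segments : Prop := ∀ (picks : List (List Int)) (gap_threshold : Int), Dom_split_segments picks gap_threshold → Pre_split_segments picks gap_threshold → Spec_split_segments picks gap_threshold (split_segments picks gap_threshold)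

-- ===== LEMMAS AND PROOFS =====

-- a one-element slice picks[a:a+1]
lemma pv_slice_one (picks : List (List Int)) (a : Nat) (h : a < picks.length) :
    (picks.take (a + 1)).drop a = [picks.getD a []] := by
  rw [List.drop_take]
  rcases hx : picks.drop a with _ | ⟨x, xs⟩
  · have : picks.length - a = 0 := by simpa using congrArg List.length hx
    omega
  · have h0 : (picks.drop a)[0]? = picks[a]? := by
      simpa using (List.getElem?_drop (l := picks) (i := a) (j := 0))
    rw [hx] at h0
    simp at h0
    simp [List.getD_eq_getElem?_getD, ← h0]

-- extending the slice picks[j:a] by picks[a] gives picks[j:a+1]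
lemma pv_slice_snoc (picks : List (List Int)) (j a : Nat) (hja : j ≤ a) (h : a < picks.length) :
    (picks.take a).drop j ++ [picks.getD a []] = (picks.take (a + 1)).drop j := by
  rw [List.take_add_one]
  have hg : picks[a]? = some picks[a] := List.getElem?_eq_getElem h
  rw [hg]
  rw [List.drop_append_of_le_length (by simp; omega)]
  simp [List.getD_eq_getElem?_getD, hg]

-- loop invariant: folding A's step over indices a..a+k-1 starting with current = picks[j:a]
-- yields exactly B's slices over the boundary list j :: breaks ++ [a+k]
lemma pv_loop (picks : List (List Int)) (g : Int) :
    ∀ (k a j : Nat) (segs : List (List (List Int))), j < a → a + k = picks.length →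
    (let st := (List.range' a k).foldl
        (fun (st : List (List (List Int)) × List (List Int)) i =>
          if (picks.getD i []).headD 0 - (picks.getD (i - 1) []).headD 0 > g then
            (st.1 ++ [st.2], [picks.getD i []])
          else (st.1, st.2 ++ [picks.getD i []]))
        (segs, (picks.take a).drop j)
     st.1 ++ [st.2])
    = segs ++
      (let bounds := j :: (List.range' a k).filter
          (fun i => decide ((picks.getD i []).headD 0 - (picks.getD (i - 1) []).headD 0 > g)) ++ [a + k]
       (bounds.zip bounds.tail).map (fun ab => (picks.take ab.2).drop ab.1)) := by
  intro k
  induction k with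
  | zero =>
    intro a j segs hj hn
    simp [List.range']
  | succ k ih =>
    intro a j segs hj hn
    have ha : a < picks.length := by omega
    rw [List.range'_succ]
    simp only [List.foldl_cons, List.filter_cons]
    by_cases hp : (picks.getD a []).headD 0 - (picks.getD (a - 1) []).headD 0 > g
    · simp only [hp, if_pos, decide_true]
      have h1 : [picks.getD a []] = (picks.take (a + 1)).drop a := (pv_slice_one picks a ha).symm
      rw [h1]
      have := ih (a + 1) a (segs ++ [(picks.take a).drop j]) (by omega) (by omega)
      simp only at this ⊢
      rw [this]
      have hk : a + 1 + k = a + (k + 1) := by omega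
      rw [hk]
      simp
    · simp only [hp, if_neg, not_false_iff, decide_false]
      rw [pv_slice_snoc picks j a (by omega) ha]
      have := ih (a + 1) j segs (by omega) (by omega)
      simp only at this ⊢
      rw [this]
      have hk : a + 1 + k = a + (k + 1) := by omega
      rw [hk]
      simp

-- ===== VERDICT (by name: the statement is the Claim_ definition above) =====
theorem split_segments_spec : Claim_equal_split_segments := by
  intro picks g _hd _hp
  show split_segments picks g = split_segments_alt picks g
  cases picks with
  | nil => rfl
  | cons p0 rest =>
    have hne : ¬(p0 :: rest = ([] : List (List Int))) := by simp
    have h := pv_loop (p0 :: rest) g rest.length 1 0 [] (by omega) (by simp; omega)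
    simp only [List.take, List.drop] at h
    simp only [split_segments, split_segments_alt, if_neg hne]
    simp only [List.length_cons, Nat.add_sub_cancel]
    rw [h]
    have hlen : 1 + rest.length = rest.length + 1 := by omega
    rw [hlen]
    simp
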